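-- pv_equiv track=rewrite | github.com/jhshin0723/Rosalind-bioinformatics | ExtensionFunctions.py | rev_palindrome
-- ===== SOURCE A (Python) =====
-- def reverse_complement(dna): #This function is used in rev_palindrome, but from previous milestone
--     rev_dna =''
--     for char in dna:
--         rev_dna = char + rev_dna
--
--     rna = ''
--     for symbol in rev_dna:
--         if symbol == 'A':
--             rna = rna + 'T'
--         elif symbol == 'T':
--             rna = rna + 'A'
--         elif symbol == 'G':
--             rna = rna + 'C'
--         elif symbol == 'C':
--             rna = rna + 'G'
--
--     return rna
--
-- def rev_palindrome(dna):
--    res = []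
--    for i in range(len(dna)-4):
--        for j in range(i+3,min(len(dna),i+12)):
--            s = dna[i:j+1]
--            if reverse_complement(dna[i:j+1]) == s:
--                res.append((i,j-i+1))
--
--    return res
-- ===== SOURCE B (Python) =====
-- def rev_palindrome(dna):
--     comp = {'A': 'T', 'T': 'A', 'G': 'C', 'C': 'G'}
--     res = []
--     n = len(dna)
--     for i in range(n - 4):
--         for j in range(i + 3, min(n, i + 12)):
--             L = j - i + 1
--             ok = True
--             k = 0
--             while ok and k < L:
--                 if comp.get(dna[i + k]) != dna[j - k]:
--                     ok = False
--                 k += 1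
--             if ok:
--                 res.append((i, L))
--     return res
-- ===== Notes on version B (the rewrite author's own statement) =====
-- stated objective: faster
-- what changed: B drops the reverse_complement helper entirely: instead of building the reversed string and its complement and comparing whole strings per window, it tests each window in place with an early-exit pairwise scan comparing dna[i+k] against dna[j-k] through a complement dict.
import Mathlib
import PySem

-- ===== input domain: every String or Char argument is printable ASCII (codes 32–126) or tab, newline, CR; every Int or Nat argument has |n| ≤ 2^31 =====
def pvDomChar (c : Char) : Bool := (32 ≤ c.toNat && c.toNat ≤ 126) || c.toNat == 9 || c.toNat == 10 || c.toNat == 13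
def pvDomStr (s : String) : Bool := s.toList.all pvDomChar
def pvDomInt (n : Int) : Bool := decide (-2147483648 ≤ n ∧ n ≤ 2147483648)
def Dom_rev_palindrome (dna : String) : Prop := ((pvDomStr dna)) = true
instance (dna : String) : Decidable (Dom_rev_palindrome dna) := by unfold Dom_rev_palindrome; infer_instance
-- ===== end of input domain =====

-- B replaces A's build-reverse-complement-and-compare by an in-place early-exit
-- pairwise complementarity scan; an alternative decomposition, same asymptotic cost.

-- ===== PORT A =====
-- helper reverse_complement: first loop reverses, second loop maps bases (silently dropping others)
def pvCompStep (rna : List Char) (symbol : Char) : List Char :=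
  if symbol = 'A' then rna ++ ['T']
  else if symbol = 'T' then rna ++ ['A']
  else if symbol = 'G' then rna ++ ['C']
  else if symbol = 'C' then rna ++ ['G']
  else rna

def pvReverseComplement (dna : List Char) : List Char :=
  let rev_dna := dna.foldl (fun acc c => c :: acc) []
  rev_dna.foldl pvCompStep []

def rev_palindrome (dna : String) : List (Int × Int) :=
  let l := dna.toList
  let n : Int := l.length
  (PySem.List.pyRange 0 (n - 4) 1).foldl (fun res i =>
    (PySem.List.pyRange (i + 3) (min n (i + 12)) 1).foldl (fun res j =>
      let s := PySem.List.slice l (some i) (some (j + 1))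
      if pvReverseComplement s = s then res ++ [(i, j - i + 1)] else res) res) []

-- ===== PORT B =====
def pvComp : PySem.Dict Char Char :=
  PySem.Dict.ofList [('A', 'T'), ('T', 'A'), ('G', 'C'), ('C', 'G')]

-- the 'while ok and k < L' flag loop: recursion on the remaining pair count, early exit on failure
def pvPairsOk (l : List Char) (i j : Int) : Nat → Int → Bool
  | 0, _ => true
  | rem + 1, k =>
    match PySem.List.pyGet? l (i + k), PySem.List.pyGet? l (j - k) with
    | some a, some b =>
      if PySem.Dict.get? pvComp a = some b then pvPairsOk l i j rem (k + 1) else false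
    | _, _ => false

def rev_palindrome_alt (dna : String) : List (Int × Int) :=
  let l := dna.toList
  let n : Int := l.length
  (PySem.List.pyRange 0 (n - 4) 1).foldl (fun res i =>
    (PySem.List.pyRange (i + 3) (min n (i + 12)) 1).foldl (fun res j =>
      if pvPairsOk l i j (j - i + 1).toNat 0 then res ++ [(i, j - i + 1)] else res) res) []

-- ===== PRECONDITION & SPEC =====
def Spec_rev_palindrome (dna : String) (out : List (Int × Int)) : Prop := out = rev_palindrome_alt dna
instance (dna : String) (out : List (Int × Int)) : Decidable (Spec_rev_palindrome dna out) := by unfold Spec_rev_palindrome; infer_instance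

-- ===== CLAIM (what is proved, stated in full; the proofs are below) =====
def Claim_equal_rev_palindrome : Prop := ∀ (dna : String), Dom_rev_palindrome dna → Spec_rev_palindrome dna (rev_palindrome dna)

-- ===== LEMMAS AND PROOFS =====

-- the base-complement partial function A's if-chain implements
def compFn (c : Char) : Option Char :=
  if c = 'A' then some 'T'
  else if c = 'T' then some 'A'
  else if c = 'G' then some 'C'
  else if c = 'C' then some 'G'
  else none

theorem pvComp_get (a : Char) : PySem.Dict.get? pvComp a = compFn a := by
  show (PySem.Dict.mk [('A','T'),('T','A'),('G','C'),('C','G')]).get? a = compFn a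
  have he : (PySem.Dict.mk ([] : List (Char × Char))).get? a = none := rfl
  simp only [PySem.Dict.get?_mk_cons, beq_iff_eq, compFn, he]
  split_ifs <;> first | rfl | simp_all | (subst_vars; simp_all)

theorem foldl_cons_rev (s : List Char) (acc : List Char) :
    s.foldl (fun acc c => c :: acc) acc = s.reverse ++ acc := by
  induction s generalizing acc with
  | nil => simp
  | cons c s ih => simp [List.foldl, ih]

theorem compStep_eq (acc : List Char) (c : Char) :
    pvCompStep acc c = acc ++ (compFn c).toList := by
  unfold pvCompStep compFn
  split_ifs <;> simp

theorem foldl_compStep (s : List Char) (acc : List Char) :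
    s.foldl pvCompStep acc = acc ++ s.filterMap compFn := by
  induction s generalizing acc with
  | nil => simp
  | cons c s ih =>
    simp only [List.foldl, compStep_eq, ih, List.filterMap_cons]
    cases h : compFn c <;> simp

theorem revComp_eq (s : List Char) :
    pvReverseComplement s = s.reverse.filterMap compFn := by
  unfold pvReverseComplement
  rw [foldl_cons_rev, List.append_nil, foldl_compStep, List.nil_append]

theorem filterMap_eq_of_pointwise (xs ys : List Char) (hlen : xs.length = ys.length)
    (h : ∀ k (hk : k < xs.length), compFn (xs[k]'hk) = some (ys[k]'(hlen ▸ hk))) :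
    xs.filterMap compFn = ys := by
  induction xs generalizing ys with
  | nil => cases ys with | nil => simp | cons y ys => simp at hlen
  | cons x xs ih =>
    cases ys with
    | nil => simp at hlen
    | cons y ys =>
      have h0 := h 0 (by simp)
      simp at h0
      have : xs.filterMap compFn = ys := by
        apply ih ys (by simpa using hlen)
        intro k hk
        have := h (k + 1) (by simpa using Nat.succ_lt_succ hk)
        simpa using this
      simp [h0, this]

theorem pointwise_of_filterMap_eq (xs ys : List Char) (heq : xs.filterMap compFn = ys)
    (hlen : xs.length = ys.length) :
    ∀ k (hk : k < xs.length), compFn (xs[k]'hk) = some (ys[k]'(hlen ▸ hk)) := by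
  induction xs generalizing ys with
  | nil => intro k hk; simp at hk
  | cons x xs ih =>
    cases ys with
    | nil => simp at hlen
    | cons y ys =>
      cases h0 : compFn x with
      | none =>
        exfalso
        have hle : (List.filterMap compFn xs).length ≤ xs.length := List.length_filterMap_le _ _
        simp only [List.filterMap_cons, h0] at heq
        have : (List.filterMap compFn xs).length = ys.length + 1 := by rw [heq]; simp
        simp at hlen; omega
      | some z =>
        simp only [List.filterMap_cons, h0] at heq
        have hz : z = y ∧ xs.filterMap compFn = ys := by
          constructor
          · exact (List.cons.injEq _ _ _ _ ▸ heq).1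
          · exact (List.cons.injEq _ _ _ _ ▸ heq).2
        intro k hk
        cases k with
        | zero => simpa [h0] using hz.1
        | succ k =>
          have := ih ys hz.2 (by simpa using hlen) k (by simpa using Nat.lt_of_succ_lt_succ hk)
          simpa using this

-- characterisation of A's window test
theorem revComp_fixed_iff (s : List Char) :
    pvReverseComplement s = s ↔
      ∀ k (hk : k < s.length), compFn (s[k]'hk) = some (s[s.length - 1 - k]'(by omega)) := by
  rw [revComp_eq]
  constructor
  · intro h k hk
    have hp := pointwise_of_filterMap_eq s.reverse s h (by simp) (s.length - 1 - k)
      (by simp; omega)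
    rw [List.getElem_reverse] at hp
    have hidx : s.length - 1 - (s.length - 1 - k) = k := by omega
    simpa [hidx] using hp
  · intro h
    apply filterMap_eq_of_pointwise _ _ (by simp)
    intro k hk
    simp only [List.getElem_reverse]
    have := h (s.length - 1 - k) (by simp at hk; omega)
    have hidx : s.length - 1 - (s.length - 1 - k) = k := by simp at hk; omega
    simp only [hidx] at this
    exact this

-- characterisation of B's window test
theorem pairsOk_iff (l : List Char) (i j : Int) (hi : 0 ≤ i) (hj : j < (l.length : Int)) :
    ∀ (rem k : Nat), i + k + rem = j + 1 →
      (pvPairsOk l i j rem (k : Int) = true ↔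
        ∀ m : Nat, m < rem → l[i.toNat + k + m]?.bind compFn = l[j.toNat - (k + m)]?) := by
  intro rem
  induction rem with
  | zero => intro k _; simp [pvPairsOk]
  | succ rem ih =>
    intro k hinv
    have hik : i.toNat + k < l.length := by omega
    have hjk : j.toNat - k < l.length := by omega
    have h1 : PySem.List.pyGet? l (i + k) = some (l[i.toNat + k]'hik) := by
      rw [PySem.List.pyGet?_of_nonneg l (by omega),
        show (i + (k : Int)).toNat = i.toNat + k from by omega, List.getElem?_eq_getElem hik]
    have h2 : PySem.List.pyGet? l (j - k) = some (l[j.toNat - k]'hjk) := by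
      rw [PySem.List.pyGet?_of_nonneg l (by omega),
        show (j - (k : Int)).toNat = j.toNat - k from by omega, List.getElem?_eq_getElem hjk]
    simp only [pvPairsOk, h1, h2, pvComp_get]
    by_cases hc : compFn (l[i.toNat + k]'hik) = some (l[j.toNat - k]'hjk)
    · have hcast : ((k : Int) + 1) = ((k + 1 : Nat) : Int) := by push_cast; ring
      rw [if_pos hc, hcast, ih (k + 1) (by omega)]
      constructor
      · intro h m hm
        cases m with
        | zero =>
          simp only [Nat.add_zero]
          rw [List.getElem?_eq_getElem hik, List.getElem?_eq_getElem hjk]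
          simpa using hc
        | succ m =>
          have := h m (by omega)
          have e1 : i.toNat + (k + 1) + m = i.toNat + k + (m + 1) := by omega
          have e2 : j.toNat - (k + 1 + m) = j.toNat - (k + (m + 1)) := by omega
          rw [e1, e2] at this
          exact this
      · intro h m hm
        have := h (m + 1) (by omega)
        have e1 : i.toNat + k + (m + 1) = i.toNat + (k + 1) + m := by omega
        have e2 : j.toNat - (k + (m + 1)) = j.toNat - (k + 1 + m) := by omega
        rw [e1, e2] at this
        exact this
    · rw [if_neg hc]
      simp only [Bool.false_eq_true, false_iff]
      intro h
      have := h 0 (by omega)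
      simp only [Nat.add_zero] at this
      rw [List.getElem?_eq_getElem hik, List.getElem?_eq_getElem hjk] at this
      simp at this
      exact hc this

-- the two window tests agree on every window the loops generate
theorem cond_iff (l : List Char) (i j : Int) (hi : 0 ≤ i) (hij : i + 3 ≤ j)
    (hj : j < (l.length : Int)) :
    (pvReverseComplement (PySem.List.slice l (some i) (some (j + 1))) =
      PySem.List.slice l (some i) (some (j + 1))) ↔
    pvPairsOk l i j (j - i + 1).toNat 0 = true := by
  set s := PySem.List.slice l (some i) (some (j + 1)) with hs
  have hslice : s = (l.drop i.toNat).take ((j + 1).toNat - i.toNat) := by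
    rw [hs, PySem.List.slice_toNat _ (by omega) (by omega)]
  have hlen : s.length = j.toNat + 1 - i.toNat := by
    rw [hslice]; simp; omega
  have hget : ∀ k (hk : k < s.length), s[k]'hk = l[i.toNat + k]'(by omega) := by
    intro k hk
    rw [List.getElem_of_eq hslice, List.getElem_take, List.getElem_drop]
  have hp := pairsOk_iff l i j hi hj (j - i + 1).toNat 0 (by omega)
  simp only [Nat.cast_zero, Nat.add_zero, Nat.zero_add] at hp
  rw [revComp_fixed_iff, hp]
  constructor
  · intro h m hm
    have hm' : m < s.length := by omega
    have := h m hm'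
    rw [hget m hm', hget (s.length - 1 - m) (by omega)] at this
    rw [List.getElem?_eq_getElem (show i.toNat + m < l.length by omega),
      List.getElem?_eq_getElem (show j.toNat - m < l.length by omega)]
    simp only [Option.bind_some]
    have e2 : i.toNat + (s.length - 1 - m) = j.toNat - m := by omega
    simp only [e2] at this
    exact this
  · intro h k hk
    have := h k (by omega)
    rw [List.getElem?_eq_getElem (show i.toNat + k < l.length by omega),
      List.getElem?_eq_getElem (show j.toNat - k < l.length by omega)] at this
    simp only [Option.bind_some] at this
    rw [hget k hk, hget (s.length - 1 - k) (by omega)]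
    have e2 : i.toNat + (s.length - 1 - k) = j.toNat - k := by omega
    simp only [e2]
    exact this

-- ===== VERDICT (by name: the statement is the Claim_ definition above) =====
theorem rev_palindrome_spec : Claim_equal_rev_palindrome := by
  intro dna _
  unfold Spec_rev_palindrome rev_palindrome rev_palindrome_alt
  apply PySem.List.foldl_congr_mem
  intro res i hi
  apply PySem.List.foldl_congr_mem
  intro res' j hj
  rw [PySem.List.mem_pyRange_one] at hi hj
  have hjn : j < (dna.toList.length : Int) := by
    have := hj.2; omega
  rw [if_congr (cond_iff dna.toList i j hi.1 hj.1 hjn) rfl rfl]
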